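-- pv_equiv track=rewrite | github.com/unfamiliarplace/ics3u | materials/documentation_exercises/documentation_3.py | myst_ri
-- ===== SOURCE A (Python) =====
-- def myst_ri(a):
--     b = False
--     c = False
--     for d in a:
--         if d.isupper():
--             b = True
--         elif d.islower():
--             c = True
--     return b and c
-- ===== SOURCE B (Python) =====
-- def myst_ri(a):
--     return any(c.isupper() for c in a) and any(c.islower() for c in a)
-- ===== Notes on version B (the rewrite author's own statement) =====
-- stated objective: idiomatic
-- what changed: Replaces the single fused loop with two boolean flags by two independent short-circuiting any() membership scans over isupper/islower.
import Mathlib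
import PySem

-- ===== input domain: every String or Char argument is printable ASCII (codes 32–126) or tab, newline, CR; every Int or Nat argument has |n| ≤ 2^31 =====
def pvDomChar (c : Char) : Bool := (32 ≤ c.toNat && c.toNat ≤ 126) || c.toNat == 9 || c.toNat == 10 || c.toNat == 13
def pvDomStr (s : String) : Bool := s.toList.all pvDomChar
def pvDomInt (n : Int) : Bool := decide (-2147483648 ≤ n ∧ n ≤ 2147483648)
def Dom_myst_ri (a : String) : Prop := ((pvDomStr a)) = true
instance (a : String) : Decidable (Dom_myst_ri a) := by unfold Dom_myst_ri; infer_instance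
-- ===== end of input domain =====

-- B: same halves-check done as two independent short-circuiting any() scans (idiomatic), instead of A's fused two-flag loop; equal cost.


-- ===== PORT A =====
def myst_ri (a : String) : Bool :=
  let st := a.toList.foldl
    (fun (bc : Bool × Bool) d =>
      if PySem.Chars.isupper d then (true, bc.2)
      else if PySem.Chars.islower d then (bc.1, true)
      else bc)
    (false, false)
  st.1 && st.2

-- ===== PORT B =====
def myst_ri_alt (a : String) : Bool :=
  a.toList.any PySem.Chars.isupper && a.toList.any PySem.Chars.islower

-- ===== PRECONDITION & SPEC =====
def Spec_myst_ri (a : String) (out : Bool) : Prop := out = myst_ri_alt a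
instance (a : String) (out : Bool) : Decidable (Spec_myst_ri a out) := by unfold Spec_myst_ri; infer_instance

-- ===== CLAIM (what is proved, stated in full; the proofs are below) =====
def Claim_equal_myst_ri : Prop := ∀ (a : String), Dom_myst_ri a → Spec_myst_ri a (myst_ri a)

-- ===== LEMMAS AND PROOFS =====


theorem upper_not_lower (c : Char) (h : PySem.Chars.isupper c = true) :
    PySem.Chars.islower c = false := by
  simp only [PySem.Chars.isupper, PySem.Chars.islower, Bool.and_eq_true, Bool.and_eq_false_iff,
    decide_eq_true_eq, decide_eq_false_iff_not, Char.le_def, UInt32.le_iff_toNat_le] at *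
  have h1 : 'A'.val.toNat = 65 := rfl
  have h2 : 'Z'.val.toNat = 90 := rfl
  have h3 : 'a'.val.toNat = 97 := rfl
  have h4 : 'z'.val.toNat = 122 := rfl
  omega

theorem foldl_flags (l : List Char) (b c : Bool) :
    l.foldl
      (fun (bc : Bool × Bool) d =>
        if PySem.Chars.isupper d then (true, bc.2)
        else if PySem.Chars.islower d then (bc.1, true)
        else bc)
      (b, c)
    = (b || l.any PySem.Chars.isupper, c || l.any PySem.Chars.islower) := by
  induction l generalizing b c with
  | nil => simp
  | cons d t ih =>
    by_cases hu : PySem.Chars.isupper d = true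
    · simp [hu, upper_not_lower d hu, ih]
    · by_cases hl : PySem.Chars.islower d = true
      · simp [hu, hl, ih]
      · simp [hu, hl, ih]

-- ===== VERDICT (by name: the statement is the Claim_ definition above) =====
theorem myst_ri_spec : Claim_equal_myst_ri := by
  intro a _
  unfold Spec_myst_ri myst_ri myst_ri_alt
  simp [foldl_flags]
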